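-- pv_equiv track=rewrite | github.com/algorithm005-class02/algorithm005-class02 | Week_08/G20190343020041/LeetCode_151_0041.py | clean_space
-- ===== SOURCE A (Python) =====
-- def clean_space(n, s):
--     i, j = 0, 0
--     while j < n:
--         while j < n and s[j] == ' ': j += 1
--         while j < n and s[j] != ' ': s[i] = s[j]; i += 1;j += 1
--         while j < n and s[j] == ' ': j += 1
--         if j < n: s[i] = " "; i += 1
--     return s[:i]
-- ===== SOURCE B (Python) =====
-- # B: tokenize-and-join instead of two-pointer in-place compaction; the
-- # write-back loop reproduces A's in-place mutation of s[0:len(result)].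
-- def clean_space(n, s):
--     words = []
--     cur = []
--     for ch in s[:max(n, 0)]:
--         if ch == ' ':
--             if cur:
--                 words.append(cur)
--                 cur = []
--         else:
--             cur.append(ch)
--     if cur:
--         words.append(cur)
--     res = []
--     for w in words:
--         if res:
--             res.append(' ')
--         res += w
--     for k, ch in enumerate(res):
--         s[k] = ch
--     return res
-- ===== Notes on version B (the rewrite author's own statement) =====
-- stated objective: idiomatic
-- what changed: Replaces A's in-place two-pointer compaction (three nested index-scanning while loops) by a single tokenize pass that collects the words and then joins them with single spaces, writing the result back into s to keep A's mutation.
import Mathlib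
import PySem

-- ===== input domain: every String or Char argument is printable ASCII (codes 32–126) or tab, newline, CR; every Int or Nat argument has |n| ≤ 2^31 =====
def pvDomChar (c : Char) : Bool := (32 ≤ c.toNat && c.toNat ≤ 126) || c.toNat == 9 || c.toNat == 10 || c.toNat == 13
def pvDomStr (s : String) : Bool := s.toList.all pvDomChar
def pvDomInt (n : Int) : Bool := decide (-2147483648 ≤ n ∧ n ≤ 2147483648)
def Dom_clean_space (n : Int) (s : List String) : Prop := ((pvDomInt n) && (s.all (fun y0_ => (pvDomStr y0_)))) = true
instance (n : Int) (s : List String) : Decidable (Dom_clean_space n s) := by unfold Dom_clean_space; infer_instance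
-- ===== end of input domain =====

-- B replaces A's in-place two-pointer compaction by tokenize-and-join (same cost);
-- the equivalence proved here is about the RETURN value — A mutates s[0:i] in place,
-- and Python B reproduces that mutation with a write-back loop (no effect on the return value).

-- ===== PORT A =====
-- Each `while` loop is ported as structural recursion on a fuel counter; the fuel
-- passed (n.toNat) is enough for the loop to run exactly as in Python (j grows by
-- at least 1 per iteration and the loops stop once j reaches n).

-- inner `while j < n and s[j] == ' ': j += 1`
def skipA (n : Int) (s : List String) (fuel j : Nat) : Nat :=
  match fuel with
  | 0 => j
  | fuel + 1 => if (j : Int) < n ∧ s.getD j "" == " " then skipA n s fuel (j + 1) else j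

-- inner `while j < n and s[j] != ' ': s[i] = s[j]; i += 1; j += 1`
def copyA (n : Int) (s : List String) (fuel i j : Nat) : List String × Nat × Nat :=
  match fuel with
  | 0 => (s, i, j)
  | fuel + 1 =>
    if (j : Int) < n ∧ ¬(s.getD j "" == " ") then
      copyA n (s.set i (s.getD j "")) fuel (i + 1) (j + 1)
    else (s, i, j)

-- outer `while j < n: …` of A
def outerA (n : Int) (s : List String) (fuel i j : Nat) : List String × Nat :=
  match fuel with
  | 0 => (s, i)
  | fuel + 1 =>
    if (j : Int) < n then
      let j1 := skipA n s n.toNat j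
      let c := copyA n s n.toNat i j1
      let j3 := skipA n c.1 n.toNat c.2.2
      if (j3 : Int) < n then outerA n (c.1.set c.2.1 " ") fuel (c.2.1 + 1) j3
      else (c.1, c.2.1)
    else (s, i)

-- A: two-pointer compaction; `s[:i]` with i ≥ 0 is `take i`
def clean_space (n : Int) (s : List String) : List String :=
  let r := outerA n s n.toNat 0 0
  r.1.take r.2

-- ===== PORT B =====
-- B: split s[:max(n,0)] into words (runs of non-" " elements), join them with single
-- " " separators.  (The Python write-back loop `s[k] = ch` only mutates s; the return
-- value is `res`, ported here.)
def clean_space_alt (n : Int) (s : List String) : List String :=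
  let t := s.take (max n 0).toNat
  let z := t.foldl
    (fun (acc : List (List String) × List String) ch =>
      if ch == " " then
        if acc.2.isEmpty then acc else (acc.1 ++ [acc.2], ([] : List String))
      else (acc.1, acc.2 ++ [ch]))
    ([], [])
  let words := if z.2.isEmpty then z.1 else z.1 ++ [z.2]
  let res := words.foldl (fun r w => (if r.isEmpty then r else r ++ [" "]) ++ w) []
  res

-- ===== PRECONDITION & SPEC =====
-- Pre_ excludes exactly the inputs where A raises IndexError (the scan reads s[j] for every j < n).
def Pre_clean_space (n : Int) (s : List String) : Prop := n ≤ (s.length : Int)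
instance (n : Int) (s : List String) : Decidable (Pre_clean_space n s) := by
  unfold Pre_clean_space; infer_instance

def pvWitness_clean_space : Int × List String := (5, ["ab", " ", " ", "c", " "])

def Spec_clean_space (n : Int) (s : List String) (out : List String) : Prop := out = clean_space_alt n s
instance (n : Int) (s : List String) (out : List String) : Decidable (Spec_clean_space n s out) := by
  unfold Spec_clean_space; infer_instance

-- ===== CLAIM (what is proved, stated in full; the proofs are below) =====
def Claim_equal_clean_space : Prop := ∀ (n : Int) (s : List String),
  Dom_clean_space n s → Pre_clean_space n s → Spec_clean_space n s (clean_space n s)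

-- ===== LEMMAS AND PROOFS =====

-- the words of a token list (cur = word under construction), and joining with single spaces
def wordsAux : List String → List String → List (List String)
  | cur, [] => if cur.isEmpty then [] else [cur]
  | cur, ch :: t =>
      if ch == " " then (if cur.isEmpty then wordsAux [] t else cur :: wordsAux [] t)
      else wordsAux (cur ++ [ch]) t

def joinW : List (List String) → List String
  | [] => []
  | w :: ws => w ++ ws.flatMap (fun x => " " :: x)

-- the still-unprocessed segment of s, for bound N and read index j
def segN (N : Nat) (s : List String) (j : Nat) : List String := (s.drop j).take (N - j)

-- ---------- generic list facts ----------
theorem drop_takeWhile_length {α : Type} (q : α → Bool) (t : List α) :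
    t.drop (t.takeWhile q).length = t.dropWhile q := by
  induction t with
  | nil => rfl
  | cons c t ih => by_cases h : q c <;> simp [List.takeWhile_cons, List.dropWhile_cons, h, ih]

theorem dropWhile_head_false {α : Type} (q : α → Bool) (t : List α) {c : α} {r : List α}
    (h : t.dropWhile q = c :: r) : q c = false := by
  induction t with
  | nil => simp at h
  | cons a t ih =>
    by_cases ha : q a
    · rw [List.dropWhile_cons, if_pos ha] at h; exact ih h
    · rw [List.dropWhile_cons, if_neg ha] at h
      cases h; simpa using ha

theorem take_set_succ {α : Type} (s : List α) (i : Nat) (v : α) (h : i < s.length) :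
    (s.set i v).take (i + 1) = s.take i ++ [v] := by
  have h1 : (s.take i).length = i := by simp; omega
  have h2 : i + 1 - i = 1 := by omega
  rw [List.set_eq_take_append_cons_drop, if_pos h, List.take_append, h1, h2, List.take_take]
  have h3 : min (i + 1) i = i := by omega
  rw [h3]
  simp

-- ---------- segN facts ----------
theorem segN_cons (N : Nat) (s : List String) (j : Nat) (hj : j < N) (hN : N ≤ s.length) :
    segN N s j = s.getD j "" :: segN N s (j + 1) := by
  have hjl : j < s.length := by omega
  rw [segN, segN, List.drop_eq_getElem_cons hjl]
  have : N - j = (N - (j + 1)) + 1 := by omega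
  rw [this, List.take_succ_cons, List.getD_eq_getElem?_getD, List.getElem?_eq_getElem hjl]
  rfl

theorem segN_add (N : Nat) (s : List String) (j k : Nat) :
    segN N s (j + k) = (segN N s j).drop k := by
  have e1 : N - (j + k) = N - j - k := by omega
  have e2 : j + k = k + j := Nat.add_comm j k
  rw [segN, segN, List.drop_take, List.drop_drop, e1, e2]

theorem segN_nil (N : Nat) (s : List String) (j : Nat) (h : N ≤ j) : segN N s j = [] := by
  simp [segN, Nat.sub_eq_zero_of_le h]

theorem segN_ne_nil (N : Nat) (s : List String) (j : Nat) (hj : j < N) (hN : N ≤ s.length) :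
    segN N s j ≠ [] := by
  rw [segN_cons N s j hj hN]; simp

-- ---------- skipA and copyA characterised on segments ----------
theorem skipA_eq (n : Int) (s : List String) (hN : n.toNat ≤ s.length) :
    ∀ (fuel j : Nat), n.toNat ≤ j + fuel →
    skipA n s fuel j = j + ((segN n.toNat s j).takeWhile (fun c => c == " ")).length := by
  intro fuel
  induction fuel with
  | zero =>
    intro j hf
    rw [segN_nil n.toNat s j (by omega)]
    simp [skipA]
  | succ fuel ih =>
    intro j hf
    rw [skipA]
    by_cases h : (j : Int) < n ∧ s.getD j "" == " "
    · rw [if_pos h]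
      have hj : j < n.toNat := by omega
      rw [segN_cons n.toNat s j hj hN, List.takeWhile_cons, if_pos h.2, ih (j + 1) (by omega)]
      simp; omega
    · rw [if_neg h]
      by_cases hj : j < n.toNat
      · have h2 : (s.getD j "" == " ") = false := by
          by_contra hb
          exact h ⟨by omega, by simpa using hb⟩
        rw [segN_cons n.toNat s j hj hN, List.takeWhile_cons, if_neg (by rw [h2]; simp)]
        simp
      · rw [segN_nil n.toNat s j (by omega)]
        simp

theorem copyA_eq (n : Int) :
    ∀ (fuel : Nat) (s : List String) (i j : Nat),
    n.toNat ≤ s.length → i ≤ j → n.toNat ≤ j + fuel →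
    (copyA n s fuel i j).2.1 = i + ((segN n.toNat s j).takeWhile (fun c => !(c == " "))).length ∧
    (copyA n s fuel i j).2.2 = j + ((segN n.toNat s j).takeWhile (fun c => !(c == " "))).length ∧
    (copyA n s fuel i j).1.length = s.length ∧
    (copyA n s fuel i j).1.take (i + ((segN n.toNat s j).takeWhile (fun c => !(c == " "))).length) =
      s.take i ++ (segN n.toNat s j).takeWhile (fun c => !(c == " ")) ∧
    (copyA n s fuel i j).1.drop (j + ((segN n.toNat s j).takeWhile (fun c => !(c == " "))).length) =
      s.drop (j + ((segN n.toNat s j).takeWhile (fun c => !(c == " "))).length) := by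
  intro fuel
  induction fuel with
  | zero =>
    intro s i j hN hij hf
    rw [segN_nil n.toNat s j (by omega)]
    simp [copyA]
  | succ fuel ih =>
    intro s i j hN hij hf
    rw [copyA]
    by_cases h : (j : Int) < n ∧ ¬(s.getD j "" == " ")
    · rw [if_pos h]
      have hjN : j < n.toNat := by omega
      have hjl : j < s.length := by omega
      have hil : i < s.length := by omega
      obtain ⟨e1, e2, e3, e4, e5⟩ :=
        ih (s.set i (s.getD j "")) (i + 1) (j + 1) (by simpa using hN) (by omega) (by omega)
      have hsegset : segN n.toNat (s.set i (s.getD j "")) (j + 1) = segN n.toNat s (j + 1) := by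
        unfold segN; rw [List.drop_set_of_lt (by omega)]
      have htw : (segN n.toNat s j).takeWhile (fun c => !(c == " ")) =
          s.getD j "" :: ((segN n.toNat s (j + 1)).takeWhile (fun c => !(c == " "))) := by
        have h2 : (s.getD j "" == " ") = false := by
          by_contra hb
          exact h.2 (by simpa using hb)
        rw [segN_cons n.toNat s j hjN hN, List.takeWhile_cons, if_pos (by rw [h2]; rfl)]
      rw [hsegset] at e1 e2 e4 e5
      refine ⟨?_, ?_, ?_, ?_, ?_⟩
      · rw [htw, e1]; simp; omega
      · rw [htw, e2]; simp; omega
      · rw [e3]; simp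
      · rw [htw]
        have harith : i + (s.getD j "" :: ((segN n.toNat s (j + 1)).takeWhile (fun c => !(c == " ")))).length =
            (i + 1) + ((segN n.toNat s (j + 1)).takeWhile (fun c => !(c == " "))).length := by
          simp; omega
        rw [harith, e4, take_set_succ s i _ hil]
        simp
      · rw [htw]
        have harith : j + (s.getD j "" :: ((segN n.toNat s (j + 1)).takeWhile (fun c => !(c == " ")))).length =
            (j + 1) + ((segN n.toNat s (j + 1)).takeWhile (fun c => !(c == " "))).length := by
          simp; omega
        rw [harith, e5, List.drop_set_of_lt (by omega)]
    · rw [if_neg h]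
      have hw : (segN n.toNat s j).takeWhile (fun c => !(c == " ")) = [] := by
        by_cases hj : j < n.toNat
        · have h2 : (s.getD j "" == " ") = true := by
            by_contra hb
            exact h ⟨by omega, hb⟩
          rw [segN_cons n.toNat s j hj hN, List.takeWhile_cons, if_neg (by rw [h2]; simp)]
        · rw [segN_nil n.toNat s j (by omega)]
          rfl
      rw [hw]
      simp

-- ---------- wordsAux facts ----------
theorem wordsAux_space (t : List String) : wordsAux [] (" " :: t) = wordsAux [] t := by
  simp [wordsAux]

theorem wordsAux_dropSpaces (t : List String) :
    wordsAux [] (t.dropWhile (fun c => c == " ")) = wordsAux [] t := by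
  induction t with
  | nil => rfl
  | cons c t ih =>
    by_cases h : c == " "
    · have hc : c = " " := by simpa using h
      subst hc
      rw [List.dropWhile_cons, if_pos h, ih, wordsAux_space]
    · rw [List.dropWhile_cons, if_neg h]

theorem wordsAux_cur (t : List String) (cur : List String) (h : cur ≠ []) :
    wordsAux cur t = (cur ++ t.takeWhile (fun c => !(c == " "))) ::
      wordsAux [] (t.dropWhile (fun c => !(c == " "))) := by
  induction t generalizing cur with
  | nil => simp [wordsAux, h]
  | cons c t ih =>
    by_cases hc : c == " "
    · have hceq : c = " " := by simpa using hc
      subst hceq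
      have h1 : wordsAux cur (" " :: t) = cur :: wordsAux [] t := by
        simp [wordsAux, List.isEmpty_iff, h]
      rw [h1, List.takeWhile_cons, List.dropWhile_cons]
      simp [wordsAux_space]
    · rw [wordsAux, if_neg hc, ih (cur ++ [c]) (by simp), List.takeWhile_cons, List.dropWhile_cons]
      simp [hc]

theorem wordsAux_word (c : String) (t : List String) (hc : (c == " ") = false) :
    wordsAux [] (c :: t) = ((c :: t).takeWhile (fun c => !(c == " "))) ::
      wordsAux [] ((c :: t).dropWhile (fun c => !(c == " "))) := by
  rw [wordsAux, if_neg (by simp [hc]), List.nil_append, wordsAux_cur t [c] (by simp)]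
  simp [List.takeWhile_cons, List.dropWhile_cons, hc]

theorem wordsAux_ne_nil (t : List String) (cur : List String) :
    ∀ w ∈ wordsAux cur t, w ≠ [] := by
  induction t generalizing cur with
  | nil =>
    intro w hw
    by_cases h : cur.isEmpty <;> simp [wordsAux, h] at hw
    subst hw; simpa [List.isEmpty_iff] using h
  | cons c t ih =>
    intro w hw
    by_cases hc : c == " "
    · by_cases h : cur.isEmpty
      · rw [wordsAux, if_pos hc, if_pos h] at hw; exact ih [] w hw
      · rw [wordsAux, if_pos hc, if_neg h] at hw
        rcases List.mem_cons.1 hw with rfl | hw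
        · simpa [List.isEmpty_iff] using h
        · exact ih [] w hw
    · rw [wordsAux, if_neg hc] at hw; exact ih (cur ++ [c]) w hw

-- ---------- the main loop invariant of A ----------
theorem outerA_eq (n : Int) :
    ∀ (fuel : Nat) (s : List String) (i j : Nat),
    n.toNat ≤ s.length → i ≤ j → n.toNat ≤ j + fuel →
    ((outerA n s fuel i j).1).take (outerA n s fuel i j).2 =
      s.take i ++ joinW (wordsAux [] (segN n.toNat s j)) := by
  intro fuel
  induction fuel with
  | zero =>
    intro s i j hN hij hf
    rw [segN_nil n.toNat s j (by omega)]
    simp [outerA, wordsAux, joinW]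
  | succ fuel ih =>
    intro s i j hN hij hf
    rw [outerA]
    by_cases h : (j : Int) < n
    · rw [if_pos h]
      dsimp only
      set j1 := skipA n s n.toNat j with hj1def
      set c := copyA n s n.toNat i j1 with hcdef
      set j3 := skipA n c.1 n.toNat c.2.2 with hj3def
      have hj1eq : j1 = j + ((segN n.toNat s j).takeWhile (fun c => c == " ")).length := by
        rw [hj1def]; exact skipA_eq n s hN n.toNat j (by omega)
      have F6 : j ≤ j1 := by omega
      have hij1 : i ≤ j1 := le_trans hij F6
      obtain ⟨e1, e2, e3, e4, e5⟩ := copyA_eq n n.toNat s i j1 hN hij1 (by omega)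
      rw [← hcdef] at e1 e2 e3 e4 e5
      have hNc : n.toNat ≤ c.1.length := e3 ▸ hN
      have hj3eq : j3 = c.2.2 + ((segN n.toNat c.1 c.2.2).takeWhile (fun c => c == " ")).length := by
        rw [hj3def]; exact skipA_eq n c.1 hNc n.toNat c.2.2 (by omega)
      have F7 : segN n.toNat s j1 = (segN n.toNat s j).dropWhile (fun c => c == " ") := by
        rw [hj1eq, segN_add, drop_takeWhile_length]
      have F8 : segN n.toNat s c.2.2 =
          (segN n.toNat s j1).dropWhile (fun c => !(c == " ")) := by
        rw [e2, segN_add, drop_takeWhile_length]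
      have F5 : segN n.toNat c.1 c.2.2 = segN n.toNat s c.2.2 := by
        unfold segN; rw [e2, e5]
      have F9 : segN n.toNat c.1 j3 = (segN n.toNat c.1 c.2.2).dropWhile (fun c => c == " ") := by
        rw [hj3eq, segN_add, drop_takeWhile_length]
      have F10 : c.2.2 ≤ j3 := by omega
      have e4' : c.1.take c.2.1 =
          s.take i ++ (segN n.toNat s j1).takeWhile (fun c => !(c == " ")) := by
        rw [e1]; exact e4
      have hWA1 : wordsAux [] (segN n.toNat s j) = wordsAux [] (segN n.toNat s j1) := by
        rw [F7]; exact (wordsAux_dropSpaces _).symm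
      by_cases h3 : (j3 : Int) < n
      · rw [if_pos h3]
        have hj3N : j3 < n.toNat := by omega
        have hj2N : c.2.2 < n.toNat := by omega
        have hi1j2 : c.2.1 ≤ c.2.2 := by rw [e1, e2]; omega
        obtain ⟨x, r, hxr⟩ : ∃ x r, segN n.toNat c.1 c.2.2 = x :: r := by
          cases hseg : segN n.toNat c.1 c.2.2 with
          | nil => exact absurd hseg (segN_ne_nil _ _ _ hj2N hNc)
          | cons x r => exact ⟨x, r, rfl⟩
        have hx : (x == " ") = true := by
          have hxr2 := hxr
          rw [F5, F8] at hxr2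
          have := dropWhile_head_false (fun c => !(c == " ")) (segN n.toNat s j1) hxr2
          simpa using this
        have hb1 : 1 ≤ ((segN n.toNat c.1 c.2.2).takeWhile (fun c => c == " ")).length := by
          rw [hxr, List.takeWhile_cons, if_pos hx]; simp
        have hi1j3 : c.2.1 < j3 := by omega
        have hi1len : c.2.1 < c.1.length := by omega
        have ihh := ih (c.1.set c.2.1 " ") (c.2.1 + 1) j3 (by simpa [e3] using hN) (by omega) (by omega)
        have hsegset : segN n.toNat (c.1.set c.2.1 " ") j3 = segN n.toNat c.1 j3 := by
          unfold segN; rw [List.drop_set_of_lt hi1j3]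
        have htk : (c.1.set c.2.1 " ").take (c.2.1 + 1) = c.1.take c.2.1 ++ [" "] :=
          take_set_succ c.1 c.2.1 " " hi1len
        have hj1N : j1 < n.toNat := by omega
        obtain ⟨y, t2, hyt⟩ : ∃ y t2, segN n.toNat s j1 = y :: t2 := by
          cases hseg : segN n.toNat s j1 with
          | nil => exact absurd hseg (segN_ne_nil _ _ _ hj1N hN)
          | cons y t2 => exact ⟨y, t2, rfl⟩
        have hy : (y == " ") = false := by
          have hyt2 := hyt
          rw [F7] at hyt2
          exact dropWhile_head_false (fun c => c == " ") (segN n.toNat s j) hyt2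
        have hWA2 : wordsAux [] (segN n.toNat s j1) =
            ((segN n.toNat s j1).takeWhile (fun c => !(c == " "))) ::
              wordsAux [] (segN n.toNat s c.2.2) := by
          rw [hyt, wordsAux_word y t2 hy, ← hyt, ← F8]
        have hWA3 : wordsAux [] (segN n.toNat s c.2.2) = wordsAux [] (segN n.toNat c.1 j3) := by
          rw [← F5, F9]
          exact (wordsAux_dropSpaces _).symm
        obtain ⟨z, r2, hz⟩ : ∃ z r2, segN n.toNat c.1 j3 = z :: r2 := by
          cases hseg : segN n.toNat c.1 j3 with
          | nil => exact absurd hseg (segN_ne_nil _ _ _ hj3N hNc)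
          | cons z r2 => exact ⟨z, r2, rfl⟩
        obtain ⟨w2, ws2, hws⟩ : ∃ w2 ws2, wordsAux [] (segN n.toNat c.1 j3) = w2 :: ws2 := by
          have hzf : (z == " ") = false := by
            have hz2 := hz
            rw [F9] at hz2
            exact dropWhile_head_false (fun c => c == " ") (segN n.toNat c.1 c.2.2) hz2
          rw [hz, wordsAux_word z r2 hzf]
          exact ⟨_, _, rfl⟩
        rw [ihh, hsegset, htk, e4', hWA1, hWA2, hWA3, hws]
        simp [joinW]
      · rw [if_neg h3]
        have hj3N : n.toNat ≤ j3 := by omega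
        have hsegj3nil : segN n.toNat c.1 j3 = [] := segN_nil _ _ _ hj3N
        by_cases hj1N : j1 < n.toNat
        · obtain ⟨y, t2, hyt⟩ : ∃ y t2, segN n.toNat s j1 = y :: t2 := by
            cases hseg : segN n.toNat s j1 with
            | nil => exact absurd hseg (segN_ne_nil _ _ _ hj1N hN)
            | cons y t2 => exact ⟨y, t2, rfl⟩
          have hy : (y == " ") = false := by
            have hyt2 := hyt
            rw [F7] at hyt2
            exact dropWhile_head_false (fun c => c == " ") (segN n.toNat s j) hyt2
          have hWA2 : wordsAux [] (segN n.toNat s j1) =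
              ((segN n.toNat s j1).takeWhile (fun c => !(c == " "))) ::
                wordsAux [] (segN n.toNat s c.2.2) := by
            rw [hyt, wordsAux_word y t2 hy, ← hyt, ← F8]
          have hWA3 : wordsAux [] (segN n.toNat s c.2.2) = wordsAux [] (segN n.toNat c.1 j3) := by
            rw [← F5, F9]
            exact (wordsAux_dropSpaces _).symm
          have htail : wordsAux [] (segN n.toNat c.1 j3) = [] := by
            rw [hsegj3nil]; rfl
          show c.1.take c.2.1 = _
          rw [e4', hWA1, hWA2, hWA3, htail]
          simp [joinW]
        · have hsegj1nil : segN n.toNat s j1 = [] := segN_nil _ _ _ (by omega)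
          show c.1.take c.2.1 = _
          rw [e4', hWA1, hsegj1nil]
          simp [wordsAux, joinW]
    · rw [if_neg h]
      have hsegnil : segN n.toNat s j = [] := segN_nil _ _ _ (by omega)
      rw [hsegnil]
      simp [wordsAux, joinW]

-- ---------- B characterised ----------
theorem foldB (t : List String) (ws : List (List String)) (cur : List String) :
    (if (t.foldl (fun (acc : List (List String) × List String) ch =>
          if ch == " " then
            if acc.2.isEmpty then acc else (acc.1 ++ [acc.2], ([] : List String))
          else (acc.1, acc.2 ++ [ch])) (ws, cur)).2.isEmpty
     then (t.foldl (fun (acc : List (List String) × List String) ch =>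
          if ch == " " then
            if acc.2.isEmpty then acc else (acc.1 ++ [acc.2], ([] : List String))
          else (acc.1, acc.2 ++ [ch])) (ws, cur)).1
     else (t.foldl (fun (acc : List (List String) × List String) ch =>
          if ch == " " then
            if acc.2.isEmpty then acc else (acc.1 ++ [acc.2], ([] : List String))
          else (acc.1, acc.2 ++ [ch])) (ws, cur)).1 ++
        [(t.foldl (fun (acc : List (List String) × List String) ch =>
          if ch == " " then
            if acc.2.isEmpty then acc else (acc.1 ++ [acc.2], ([] : List String))
          else (acc.1, acc.2 ++ [ch])) (ws, cur)).2]) = ws ++ wordsAux cur t := by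
  induction t generalizing ws cur with
  | nil =>
    by_cases h : cur.isEmpty <;> simp [wordsAux, h]
  | cons c t ih =>
    by_cases hc : c == " "
    · by_cases h : cur.isEmpty
      · simp only [List.foldl_cons, hc, if_pos hc, if_pos h, ih, wordsAux, h, if_true]
        simp [List.isEmpty_iff.mp h]
      · simp only [List.foldl_cons, if_pos hc, if_neg h, ih, wordsAux, h, if_false]
        simp
    · simp only [List.foldl_cons, if_neg hc, ih, wordsAux, hc, if_false]
      simp [hc]

theorem foldJ_ne (ws : List (List String)) (r : List String) (h : r ≠ []) :
    ws.foldl (fun r w => (if r.isEmpty then r else r ++ [" "]) ++ w) r =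
      r ++ ws.flatMap (fun x => " " :: x) := by
  induction ws generalizing r with
  | nil => simp
  | cons w ws ih =>
    rw [List.foldl_cons, if_neg (by simpa [List.isEmpty_iff] using h), ih _ (by simp [h])]
    simp

theorem foldJ (ws : List (List String)) (h : ∀ w ∈ ws, w ≠ []) :
    ws.foldl (fun r w => (if r.isEmpty then r else r ++ [" "]) ++ w) [] = joinW ws := by
  cases ws with
  | nil => rfl
  | cons w ws =>
    have hw : w ≠ [] := h w (by simp)
    rw [List.foldl_cons]
    have h0 : (if ([] : List String).isEmpty = true then ([] : List String) else [] ++ [" "]) ++ w = w := by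
      simp
    rw [h0, foldJ_ne ws w hw, joinW]

theorem altB (n : Int) (s : List String) :
    clean_space_alt n s = joinW (wordsAux [] (s.take (max n 0).toNat)) := by
  rw [clean_space_alt]
  rw [foldJ _ (by
    intro w hw
    rw [foldB (s.take (max n 0).toNat) [] []] at hw
    exact wordsAux_ne_nil _ _ w (by simpa using hw))]
  rw [foldB (s.take (max n 0).toNat) [] []]
  simp

-- ===== VERDICT (by name: the statement is the Claim_ definition above) =====
theorem clean_space_spec : Claim_equal_clean_space := by
  intro n s _ hpre
  unfold Spec_clean_space
  have hN : n.toNat ≤ s.length := by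
    unfold Pre_clean_space at hpre; omega
  have h0 := outerA_eq n n.toNat s 0 0 hN (le_refl 0) (by omega)
  rw [clean_space, altB]
  have hmax : (max n 0).toNat = n.toNat := by omega
  rw [hmax]
  simp only [List.take_zero, List.nil_append] at h0
  have hseg : segN n.toNat s 0 = s.take n.toNat := by simp [segN]
  rw [h0, hseg]
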